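-- pv_equiv track=rewrite | github.com/JKYang01/Sentiment-Analysis-NLP- | python code/HW4 NLTK_ SciKit Learn .py | NOT_features
-- ===== SOURCE A (Python) =====
-- def NOT_features(document, word_features, negationwords):
--     features = {}
--     for word in word_features:
--         features['v_{}'.format(word)] = 0
--         features['v_NOT{}'.format(word)] = 0
-- # go through document words in order
--     for i in range(0, len(document)):
--         word = document[i]
--         if ((i + 1) < len(document)) and ((word in negationwords) or (word.endswith("n't"))):
--             i += 1
--             if document[i] in word_features:
--                 features['v_NOT{}'.format(document[i])] = 1
--         else:
--             if document[i] in word_features: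
--                 features['v_{}'.format(word)] = 1
--     return features
-- ===== SOURCE B (Python) =====
-- def NOT_features(document, word_features, negationwords):
--     # For each feature word, decide its two features directly by an existential
--     # search over the document: a plain occurrence (at a non-negating position)
--     # and a negated occurrence (right after a negating position).
--     negset = set(negationwords)
--     n = len(document)
--
--     def negating(i):
--         return i + 1 < n and (document[i] in negset or document[i].endswith("n't"))
--
--     features = {}
--     for w in word_features:
--         features['v_' + w] = int(any(document[i] == w and not negating(i) for i in range(n)))
--         features['v_NOT' + w] = int(any(negating(i) and document[i + 1] == w for i in range(n - 1)))
--     return features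
-- ===== Notes on version B (the rewrite author's own statement) =====
-- stated objective: alternative
-- what changed: Replaces A's stateful document-order scan that zero-initializes a dict and then mutates it position by position with a feature-directed search: for each word in word_features its two feature values are computed directly as existential searches over the document (a plain occurrence at a non-negating position, a negated occurrence right after a negating position), so the dict is built once with its final values and A's per-position 'in word_features' scans disappear.
import Mathlib
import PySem

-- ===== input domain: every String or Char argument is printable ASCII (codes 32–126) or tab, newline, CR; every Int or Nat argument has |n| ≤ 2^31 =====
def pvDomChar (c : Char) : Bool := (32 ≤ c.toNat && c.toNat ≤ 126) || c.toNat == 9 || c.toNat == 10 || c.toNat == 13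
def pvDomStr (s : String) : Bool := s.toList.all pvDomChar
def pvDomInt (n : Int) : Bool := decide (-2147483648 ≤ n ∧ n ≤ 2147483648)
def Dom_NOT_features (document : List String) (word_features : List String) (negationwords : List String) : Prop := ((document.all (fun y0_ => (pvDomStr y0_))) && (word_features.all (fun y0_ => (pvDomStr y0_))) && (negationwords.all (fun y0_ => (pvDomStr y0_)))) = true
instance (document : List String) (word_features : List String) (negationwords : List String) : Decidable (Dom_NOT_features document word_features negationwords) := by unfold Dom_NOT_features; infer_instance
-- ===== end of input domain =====

-- B replaces A's stateful document-order scan (zero-initialize a dict, then mutate it position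
-- by position) by a feature-directed computation: each feature's value is an existential search
-- over the document, so the dict is built once with its final values (objective: alternative).

-- ===== PORT A =====
def NOT_features (document : List String) (word_features : List String) (negationwords : List String) : List (String × Int) :=
  let features : PySem.Dict String Int :=
    word_features.foldl (fun fs w =>
      (fs.insert ("v_" ++ w) 0).insert ("v_NOT" ++ w) 0) PySem.Dict.empty
  let features :=
    (PySem.List.pyRange 0 (PySem.List.len document) 1).foldl (fun fs i =>
      let word := PySem.List.pyGetD document i ""
      if decide (i + 1 < PySem.List.len document) &&
          (negationwords.contains word || PySem.Str.endswith word "n't") then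
        let i := i + 1
        if word_features.contains (PySem.List.pyGetD document i "") then
          fs.insert ("v_NOT" ++ PySem.List.pyGetD document i "") 1
        else fs
      else
        if word_features.contains (PySem.List.pyGetD document i "") then
          fs.insert ("v_" ++ word) 1
        else fs) features
  features.items

-- ===== PORT B =====
def NOT_features_alt (document : List String) (word_features : List String) (negationwords : List String) : List (String × Int) :=
  let negset : PySem.Set String := PySem.Set.ofList negationwords
  let n := PySem.List.len document
  let negating : Int → Bool := fun i =>
    decide (i + 1 < n) &&
      (PySem.Set.contains negset (PySem.List.pyGetD document i "") ||
        PySem.Str.endswith (PySem.List.pyGetD document i "") "n't")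
  let features := word_features.foldl
    (fun (fs : PySem.Dict String Int) w =>
      (fs.insert ("v_" ++ w)
          (if (PySem.List.pyRange 0 n 1).any
              (fun i => (PySem.List.pyGetD document i "" == w) && !(negating i)) then 1 else 0)).insert
        ("v_NOT" ++ w)
          (if (PySem.List.pyRange 0 (n - 1) 1).any
              (fun i => negating i && (PySem.List.pyGetD document (i + 1) "" == w)) then 1 else 0))
    PySem.Dict.empty
  features.items

-- ===== PRECONDITION & SPEC =====
-- Pre_ excludes word_features lists containing both some w and "NOT" ++ w: there the feature
-- key 'v_NOT'+w textually collides with the key 'v_'+('NOT'+w) and A's value at that shared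
-- key depends on the accidental order of A's dict writes, which B does not reproduce.
def Pre_NOT_features (document : List String) (word_features : List String) (negationwords : List String) : Prop :=
  ∀ w ∈ word_features, ("NOT" ++ w) ∉ word_features
instance (document : List String) (word_features : List String) (negationwords : List String) : Decidable (Pre_NOT_features document word_features negationwords) := by unfold Pre_NOT_features; infer_instance

def pvWitness_NOT_features : List String × List String × List String :=
  (["not", "good"], ["good", "bad"], ["not"])

def Spec_NOT_features (document : List String) (word_features : List String) (negationwords : List String) (out : List (String × Int)) : Prop := out = NOT_features_alt document word_features negationwords
instance (document : List String) (word_features : List String) (negationwords : List String) (out : List (String × Int)) : Decidable (Spec_NOT_features document word_features negationwords out) := by unfold Spec_NOT_features; infer_instance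

-- ===== CLAIM (what is proved, stated in full; the proofs are below) =====
def Claim_equal_NOT_features : Prop := ∀ (document : List String) (word_features : List String) (negationwords : List String), Dom_NOT_features document word_features negationwords → Pre_NOT_features document word_features negationwords → Spec_NOT_features document word_features negationwords (NOT_features document word_features negationwords)

-- ===== LEMMAS AND PROOFS =====

def pvKp (w : String) : String := "v_" ++ w
def pvKn (w : String) : String := "v_NOT" ++ w

theorem pvKn_eq_kp (w : String) : pvKn w = pvKp ("NOT" ++ w) := by
  have h : ("v_NOT" : String) = "v_" ++ "NOT" := by decide
  rw [pvKn, pvKp, h, String.append_assoc]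

theorem pvKp_inj {w u : String} (h : pvKp w = pvKp u) : w = u :=
  (String.append_right_inj "v_").mp h

theorem pvKn_inj {w u : String} (h : pvKn w = pvKn u) : w = u :=
  (String.append_right_inj "v_NOT").mp h

theorem pvKp_eq_kn_iff {w u : String} : pvKp w = pvKn u ↔ w = "NOT" ++ u := by
  rw [pvKn_eq_kp, pvKp, pvKp]
  exact String.append_right_inj "v_"

def pvCond (document : List String) (negationwords : List String) (j : Int) : Bool :=
  decide (j + 1 < PySem.List.len document) &&
    (negationwords.contains (PySem.List.pyGetD document j "") ||
      PySem.Str.endswith (PySem.List.pyGetD document j "") "n't")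

-- B's 'negating' test computes the same Bool as A's scan condition (set vs list membership).
theorem pvNegB_eq_cond (document negationwords : List String) (i : Int) :
    (decide (i + 1 < PySem.List.len document) &&
      (PySem.Set.contains (PySem.Set.ofList negationwords) (PySem.List.pyGetD document i "") ||
        PySem.Str.endswith (PySem.List.pyGetD document i "") "n't"))
    = pvCond document negationwords i := by
  unfold pvCond
  congr 1
  congr 1
  rw [Bool.eq_iff_iff, PySem.Set.contains_iff, PySem.Set.mem_ofList]
  exact ⟨List.elem_eq_true_of_mem, List.mem_of_elem_eq_true⟩

def pvKeyAt (document : List String) (word_features : List String) (negationwords : List String) (j : Int) : Option String :=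
  if pvCond document negationwords j then
    if word_features.contains (PySem.List.pyGetD document (j + 1) "") then
      some ("v_NOT" ++ PySem.List.pyGetD document (j + 1) "")
    else none
  else
    if word_features.contains (PySem.List.pyGetD document j "") then
      some ("v_" ++ PySem.List.pyGetD document j "")
    else none

theorem pvScan_getD (document word_features negationwords : List String) (l : List Int) (d : PySem.Dict String Int) (k : String) :
    ((l.foldl (fun fs j =>
        match pvKeyAt document word_features negationwords j with
        | some k' => fs.insert k' 1
        | none => fs) d).getD k 0)
    = if ∃ j ∈ l, pvKeyAt document word_features negationwords j = some k then 1 else d.getD k 0 := by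
  induction l generalizing d with
  | nil => simp
  | cons j l ih =>
    simp only [List.foldl_cons, ih, List.mem_cons]
    rcases h : pvKeyAt document word_features negationwords j with _ | k'
    · simp only [h]
      by_cases hex : ∃ x ∈ l, pvKeyAt document word_features negationwords x = some k
      · rw [if_pos hex, if_pos (by obtain ⟨x, hx, hk⟩ := hex; exact ⟨x, List.mem_cons_of_mem _ hx, hk⟩)]
      · rw [if_neg hex, if_neg (by
          rintro ⟨x, hx, hk⟩
          rcases List.mem_cons.mp hx with rfl | hx
          · rw [h] at hk; simp at hk
          · exact hex ⟨x, hx, hk⟩)]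
    · simp only [h]
      by_cases hex : ∃ x ∈ l, pvKeyAt document word_features negationwords x = some k
      · rw [if_pos hex, if_pos (by obtain ⟨x, hx, hk⟩ := hex; exact ⟨x, List.mem_cons_of_mem _ hx, hk⟩)]
      · rw [if_neg hex, PySem.Dict.getD_insert]
        by_cases hk : k = k'
        · rw [if_pos hk, if_pos ⟨j, List.mem_cons_self, by rw [h, hk]⟩]
        · rw [if_neg hk, if_neg (by
            rintro ⟨x, hx, hkk⟩
            rcases List.mem_cons.mp hx with rfl | hx
            · rw [h] at hkk; exact hk (Option.some.inj hkk).symm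
            · exact hex ⟨x, hx, hkk⟩)]

theorem pvScan_keys (document word_features negationwords : List String) (l : List Int) (d : PySem.Dict String Int)
    (h : ∀ k, (∃ j ∈ l, pvKeyAt document word_features negationwords j = some k) → k ∈ d.keys) :
    (l.foldl (fun fs j =>
        match pvKeyAt document word_features negationwords j with
        | some k' => fs.insert k' 1
        | none => fs) d).keys = d.keys := by
  induction l generalizing d with
  | nil => simp
  | cons j l ih =>
    simp only [List.foldl_cons]
    rcases hj : pvKeyAt document word_features negationwords j with _ | k'
    · simp only [hj]
      exact ih d (fun k hk => h k (by rcases hk with ⟨x, hx, hkx⟩; exact ⟨x, List.mem_cons_of_mem _ hx, hkx⟩))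
    · simp only [hj]
      have hc : d.contains k' = true := by
        rw [PySem.Dict.contains_iff_mem_keys]
        exact h k' ⟨j, List.mem_cons_self, hj⟩
      have hkeys : (d.insert k' 1).keys = d.keys := PySem.Dict.keys_insert_of_contains d 1 hc
      rw [ih (d.insert k' 1) (fun k hk => by rw [hkeys]; exact h k (by rcases hk with ⟨x, hx, hkx⟩; exact ⟨x, List.mem_cons_of_mem _ hx, hkx⟩)), hkeys]

theorem pvPairs_fold (f g : String → Int) (l : List String) (d : PySem.Dict String Int) :
    l.foldl (fun fs w => (fs.insert (pvKp w) (f w)).insert (pvKn w) (g w)) d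
    = (l.flatMap fun w => [(pvKp w, f w), (pvKn w, g w)]).foldl (fun fs p => fs.insert p.1 p.2) d := by
  induction l generalizing d with
  | nil => rfl
  | cons w l ih => simp only [List.foldl_cons, List.flatMap_cons, List.foldl_append, ih]; rfl

theorem pvGetD_foldl_insert_W (V : String → Int) (ps : List (String × Int)) (d : PySem.Dict String Int)
    (hp : ∀ p ∈ ps, p.2 = V p.1) (hd : ∀ k, d.getD k 0 = if k ∈ d.keys then V k else 0) (k : String) :
    (ps.foldl (fun fs p => fs.insert p.1 p.2) d).getD k 0
    = if k ∈ (ps.foldl (fun fs p => fs.insert p.1 p.2) d).keys then V k else 0 := by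
  induction ps generalizing d with
  | nil => exact hd k
  | cons p ps ih =>
    simp only [List.foldl_cons]
    refine ih _ (fun q hq => hp q (List.mem_cons_of_mem _ hq)) (fun k' => ?_)
    rw [PySem.Dict.getD_insert]
    by_cases hk : k' = p.1
    · rw [if_pos hk, if_pos (by rw [PySem.Dict.mem_keys_insert]; exact Or.inl hk),
        hp p List.mem_cons_self, hk]
    · rw [if_neg hk, hd k']
      by_cases hm : k' ∈ d.keys
      · rw [if_pos hm, if_pos (by rw [PySem.Dict.mem_keys_insert]; exact Or.inr hm)]
      · rw [if_neg hm, if_neg (by rw [PySem.Dict.mem_keys_insert]; tauto)]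

def pvW (document : List String) (word_features : List String) (negationwords : List String) (k : String) : Int :=
  if ∃ j ∈ PySem.List.pyRange 0 (PySem.List.len document) 1, pvKeyAt document word_features negationwords j = some k then 1 else 0

theorem pvKeyAt_some (document word_features negationwords : List String) (j : Int) (k : String)
    (h : pvKeyAt document word_features negationwords j = some k) :
    ∃ u ∈ word_features, k = "v_" ++ u ∨ k = "v_NOT" ++ u := by
  unfold pvKeyAt at h
  split_ifs at h with hc hm hm
  · exact ⟨_, List.mem_of_elem_eq_true hm, Or.inr (Option.some.inj h).symm⟩
  · exact ⟨_, List.mem_of_elem_eq_true hm, Or.inl (Option.some.inj h).symm⟩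

theorem pvC1 (document word_features negationwords : List String)
    (hpre : ∀ w ∈ word_features, ("NOT" ++ w) ∉ word_features)
    (w : String) (hw : w ∈ word_features) (j : Int) :
    pvKeyAt document word_features negationwords j = some ("v_" ++ w)
      ↔ (pvCond document negationwords j = false ∧ PySem.List.pyGetD document j "" = w) := by
  constructor
  · intro h
    unfold pvKeyAt at h
    split_ifs at h with hc hm hm
    · exfalso
      have heq : pvKp w = pvKn (PySem.List.pyGetD document (j + 1) "") :=
        ((Option.some.inj h).symm : ("v_" ++ w : String) = _)
      have hwNOT : w = "NOT" ++ PySem.List.pyGetD document (j + 1) "" := pvKp_eq_kn_iff.mp heq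
      exact hpre _ (List.mem_of_elem_eq_true hm) (hwNOT ▸ hw)
    · exact ⟨by simpa using hc, pvKp_inj ((Option.some.inj h) : pvKp _ = pvKp w)⟩
  · rintro ⟨hc, hd⟩
    unfold pvKeyAt
    rw [if_neg (by simp [hc]), if_pos (by rw [hd]; exact List.elem_eq_true_of_mem hw), hd]

theorem pvC2 (document word_features negationwords : List String)
    (hpre : ∀ w ∈ word_features, ("NOT" ++ w) ∉ word_features)
    (w : String) (hw : w ∈ word_features) (j : Int) :
    pvKeyAt document word_features negationwords j = some ("v_NOT" ++ w)
      ↔ (pvCond document negationwords j = true ∧ PySem.List.pyGetD document (j + 1) "" = w) := by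
  constructor
  · intro h
    unfold pvKeyAt at h
    split_ifs at h with hc hm hm
    · exact ⟨hc, pvKn_inj ((Option.some.inj h) : pvKn _ = pvKn w)⟩
    · exfalso
      have heq : pvKp (PySem.List.pyGetD document j "") = pvKn w := Option.some.inj h
      have : PySem.List.pyGetD document j "" = "NOT" ++ w := pvKp_eq_kn_iff.mp heq
      exact hpre w hw (this ▸ List.mem_of_elem_eq_true hm)
  · rintro ⟨hc, hd⟩
    unfold pvKeyAt
    rw [if_pos hc, if_pos (by rw [hd]; exact List.elem_eq_true_of_mem hw), hd]

-- B's plain-feature search finds exactly the scan positions where A writes 'v_'+w.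
theorem pvB1 (document word_features negationwords : List String)
    (hpre : ∀ w ∈ word_features, ("NOT" ++ w) ∉ word_features)
    (w : String) (hw : w ∈ word_features) :
    ((PySem.List.pyRange 0 (PySem.List.len document) 1).any
        (fun i => (PySem.List.pyGetD document i "" == w) && !(pvCond document negationwords i)) = true)
      ↔ ∃ j ∈ PySem.List.pyRange 0 (PySem.List.len document) 1,
          pvKeyAt document word_features negationwords j = some ("v_" ++ w) := by
  rw [List.any_eq_true]
  constructor
  · rintro ⟨i, hi, hp⟩
    rw [Bool.and_eq_true, beq_iff_eq, Bool.not_eq_true'] at hp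
    exact ⟨i, hi, (pvC1 document word_features negationwords hpre w hw i).mpr ⟨hp.2, hp.1⟩⟩
  · rintro ⟨j, hj, hkey⟩
    obtain ⟨hc, hd⟩ := (pvC1 document word_features negationwords hpre w hw j).mp hkey
    exact ⟨j, hj, by rw [Bool.and_eq_true, beq_iff_eq, Bool.not_eq_true']; exact ⟨hd, hc⟩⟩

-- B's negated-feature search (over range(n-1)) finds exactly the scan positions where A writes 'v_NOT'+w.
theorem pvB2 (document word_features negationwords : List String)
    (hpre : ∀ w ∈ word_features, ("NOT" ++ w) ∉ word_features)
    (w : String) (hw : w ∈ word_features) :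
    ((PySem.List.pyRange 0 (PySem.List.len document - 1) 1).any
        (fun i => pvCond document negationwords i && (PySem.List.pyGetD document (i + 1) "" == w)) = true)
      ↔ ∃ j ∈ PySem.List.pyRange 0 (PySem.List.len document) 1,
          pvKeyAt document word_features negationwords j = some ("v_NOT" ++ w) := by
  rw [List.any_eq_true]
  constructor
  · rintro ⟨i, hi, hp⟩
    rw [Bool.and_eq_true, beq_iff_eq] at hp
    have hmem := (PySem.List.mem_pyRange_one).mp hi
    exact ⟨i, (PySem.List.mem_pyRange_one).mpr ⟨hmem.1, by omega⟩,
      (pvC2 document word_features negationwords hpre w hw i).mpr ⟨hp.1, hp.2⟩⟩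
  · rintro ⟨j, hj, hkey⟩
    obtain ⟨hc, hd⟩ := (pvC2 document word_features negationwords hpre w hw j).mp hkey
    have hlt : j + 1 < PySem.List.len document := by
      have hc' := hc
      unfold pvCond at hc'
      rw [Bool.and_eq_true] at hc'
      exact of_decide_eq_true hc'.1
    have hmem := (PySem.List.mem_pyRange_one).mp hj
    exact ⟨j, (PySem.List.mem_pyRange_one).mpr ⟨hmem.1, by omega⟩,
      by rw [Bool.and_eq_true, beq_iff_eq]; exact ⟨hc, hd⟩⟩

theorem pv_main (document word_features negationwords : List String)
    (hpre : ∀ w ∈ word_features, ("NOT" ++ w) ∉ word_features) :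
    NOT_features document word_features negationwords
    = NOT_features_alt document word_features negationwords := by
  simp only [NOT_features, NOT_features_alt]
  simp only [pvNegB_eq_cond]
  -- A's scan step as "insert the key pvKeyAt computes, or skip"
  have hfA : (fun (fs : PySem.Dict String Int) (i : Int) =>
      if (decide (i + 1 < PySem.List.len document) &&
            (negationwords.contains (PySem.List.pyGetD document i "") ||
              PySem.Str.endswith (PySem.List.pyGetD document i "") "n't")) = true then
        if word_features.contains (PySem.List.pyGetD document (i + 1) "") = true then
          fs.insert ("v_NOT" ++ PySem.List.pyGetD document (i + 1) "") 1
        else fs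
      else
        if word_features.contains (PySem.List.pyGetD document i "") = true then
          fs.insert ("v_" ++ PySem.List.pyGetD document i "") 1
        else fs)
      = (fun fs j => match pvKeyAt document word_features negationwords j with
          | some k' => fs.insert k' 1
          | none => fs) := by
    funext fs i
    simp only [pvKeyAt, pvCond, pvKp, pvKn]
    split_ifs <;> rfl
  rw [hfA]
  -- both dict-building folds as folds over explicit pair lists
  have hA0 := pvPairs_fold (fun _ => 0) (fun _ => 0) word_features PySem.Dict.empty
  have hB0 := pvPairs_fold
      (fun w => if (PySem.List.pyRange 0 (PySem.List.len document) 1).any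
          (fun i => (PySem.List.pyGetD document i "" == w) && !(pvCond document negationwords i)) then 1 else 0)
      (fun w => if (PySem.List.pyRange 0 (PySem.List.len document - 1) 1).any
          (fun i => pvCond document negationwords i && (PySem.List.pyGetD document (i + 1) "" == w)) then 1 else 0)
      word_features PySem.Dict.empty
  simp only [pvKp, pvKn] at hA0 hB0
  rw [hA0, hB0]
  -- keys of a pairs fold
  have hkeysA := PySem.Dict.keys_foldl_insert_key (ν := Int)
      (List.flatMap (fun w => [("v_" ++ w, (0 : Int)), ("v_NOT" ++ w, 0)]) word_features)
      Prod.fst (fun _ p => p.2) PySem.Dict.empty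
  have hkeysB := PySem.Dict.keys_foldl_insert_key (ν := Int)
      (List.flatMap (fun w =>
        [("v_" ++ w, if (PySem.List.pyRange 0 (PySem.List.len document) 1).any
            (fun i => (PySem.List.pyGetD document i "" == w) && !(pvCond document negationwords i)) then (1 : Int) else 0),
         ("v_NOT" ++ w, if (PySem.List.pyRange 0 (PySem.List.len document - 1) 1).any
            (fun i => pvCond document negationwords i && (PySem.List.pyGetD document (i + 1) "" == w)) then 1 else 0)]) word_features)
      Prod.fst (fun _ p => p.2) PySem.Dict.empty
  simp only [List.map_flatMap, List.map_cons, List.map_nil, PySem.Dict.keys_empty] at hkeysA hkeysB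
  -- membership in the common key list
  have hmemKS : ∀ k : String,
      k ∈ PySem.Set.update ([] : List String)
            (List.flatMap (fun a => ["v_" ++ a, "v_NOT" ++ a]) word_features)
      ↔ ∃ w ∈ word_features, k = "v_" ++ w ∨ k = "v_NOT" ++ w := by
    intro k
    simp only [PySem.Set.mem_update, List.mem_flatMap, List.mem_cons, List.mem_singleton]
    constructor
    · rintro (h | ⟨w, hw, h⟩)
      · simp at h
      · exact ⟨w, hw, by tauto⟩
    · rintro ⟨w, hw, h⟩
      exact Or.inr ⟨w, hw, by tauto⟩
  -- nodup of keys
  have hnodA := PySem.Dict.nodup_keys_foldl_insert_key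
      (List.flatMap (fun w => [("v_" ++ w, (0 : Int)), ("v_NOT" ++ w, 0)]) word_features)
      Prod.fst (fun _ p => p.2) PySem.Dict.empty PySem.Dict.nodup_keys_empty
  have hnodB := PySem.Dict.nodup_keys_foldl_insert_key
      (List.flatMap (fun w =>
        [("v_" ++ w, if (PySem.List.pyRange 0 (PySem.List.len document) 1).any
            (fun i => (PySem.List.pyGetD document i "" == w) && !(pvCond document negationwords i)) then (1 : Int) else 0),
         ("v_NOT" ++ w, if (PySem.List.pyRange 0 (PySem.List.len document - 1) 1).any
            (fun i => pvCond document negationwords i && (PySem.List.pyGetD document (i + 1) "" == w)) then 1 else 0)]) word_features)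
      Prod.fst (fun _ p => p.2) PySem.Dict.empty PySem.Dict.nodup_keys_empty
  -- A's init dict is all-zero
  have hzeroA : ∀ k : String,
      ((List.flatMap (fun w => [("v_" ++ w, (0 : Int)), ("v_NOT" ++ w, 0)]) word_features).foldl
        (fun fs p => fs.insert p.1 p.2) (PySem.Dict.empty : PySem.Dict String Int)).getD k 0 = 0 := by
    intro k
    rw [pvGetD_foldl_insert_W (fun _ => 0) _ _
      (by
        intro p hp
        obtain ⟨w, hw, hm⟩ := List.mem_flatMap.mp hp
        rcases List.mem_cons.mp hm with rfl | hm
        · rfl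
        · rcases List.mem_singleton.mp hm with rfl; rfl)
      (by intro k'; simp [PySem.Dict.getD_empty, PySem.Dict.keys_empty])]
    split_ifs <;> rfl
  -- A's scan: value at k is pvW k
  have hSAg : ∀ k : String,
      ((PySem.List.pyRange 0 (PySem.List.len document)).foldl
        (fun fs j =>
          match pvKeyAt document word_features negationwords j with
          | some k' => fs.insert k' 1
          | none => fs)
        ((List.flatMap (fun w => [("v_" ++ w, (0 : Int)), ("v_NOT" ++ w, 0)]) word_features).foldl
          (fun fs p => fs.insert p.1 p.2) (PySem.Dict.empty : PySem.Dict String Int))).getD k 0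
      = pvW document word_features negationwords k := by
    intro k
    rw [pvScan_getD, hzeroA k]; rfl
  -- A's scan preserves the keys
  have hSAk :
      ((PySem.List.pyRange 0 (PySem.List.len document)).foldl
        (fun fs j =>
          match pvKeyAt document word_features negationwords j with
          | some k' => fs.insert k' 1
          | none => fs)
        ((List.flatMap (fun w => [("v_" ++ w, (0 : Int)), ("v_NOT" ++ w, 0)]) word_features).foldl
          (fun fs p => fs.insert p.1 p.2) (PySem.Dict.empty : PySem.Dict String Int))).keys
      = PySem.Set.update ([] : List String)
          (List.flatMap (fun a => ["v_" ++ a, "v_NOT" ++ a]) word_features) := by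
    rw [pvScan_keys, hkeysA]
    intro k hk
    obtain ⟨j, hj, hkey⟩ := hk
    rw [hkeysA, hmemKS k]
    exact pvKeyAt_some document word_features negationwords j k hkey
  -- B's pair values agree with pvW
  have hp : ∀ p ∈ (List.flatMap (fun w =>
        [("v_" ++ w, if (PySem.List.pyRange 0 (PySem.List.len document) 1).any
            (fun i => (PySem.List.pyGetD document i "" == w) && !(pvCond document negationwords i)) then (1 : Int) else 0),
         ("v_NOT" ++ w, if (PySem.List.pyRange 0 (PySem.List.len document - 1) 1).any
            (fun i => pvCond document negationwords i && (PySem.List.pyGetD document (i + 1) "" == w)) then 1 else 0)]) word_features),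
      p.2 = pvW document word_features negationwords p.1 := by
    rintro p hpmem
    obtain ⟨w, hw, hmem⟩ := List.mem_flatMap.mp hpmem
    rcases List.mem_cons.mp hmem with rfl | hmem
    · show (if (PySem.List.pyRange 0 (PySem.List.len document) 1).any
          (fun i => (PySem.List.pyGetD document i "" == w) && !(pvCond document negationwords i)) then (1 : Int) else 0) = _
      unfold pvW
      by_cases hcw : (PySem.List.pyRange 0 (PySem.List.len document) 1).any
          (fun i => (PySem.List.pyGetD document i "" == w) && !(pvCond document negationwords i)) = true
      · rw [if_pos hcw, if_pos ((pvB1 document word_features negationwords hpre w hw).mp hcw)]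
      · rw [if_neg hcw, if_neg (fun hx => hcw ((pvB1 document word_features negationwords hpre w hw).mpr hx))]
    · rcases List.mem_singleton.mp hmem with rfl
      show (if (PySem.List.pyRange 0 (PySem.List.len document - 1) 1).any
          (fun i => pvCond document negationwords i && (PySem.List.pyGetD document (i + 1) "" == w)) then (1 : Int) else 0) = _
      unfold pvW
      by_cases hcw : (PySem.List.pyRange 0 (PySem.List.len document - 1) 1).any
          (fun i => pvCond document negationwords i && (PySem.List.pyGetD document (i + 1) "" == w)) = true
      · rw [if_pos hcw, if_pos ((pvB2 document word_features negationwords hpre w hw).mp hcw)]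
      · rw [if_neg hcw, if_neg (fun hx => hcw ((pvB2 document word_features negationwords hpre w hw).mpr hx))]
  -- B's dict values
  have hDBg : ∀ k : String,
      ((List.flatMap (fun w =>
        [("v_" ++ w, if (PySem.List.pyRange 0 (PySem.List.len document) 1).any
            (fun i => (PySem.List.pyGetD document i "" == w) && !(pvCond document negationwords i)) then (1 : Int) else 0),
         ("v_NOT" ++ w, if (PySem.List.pyRange 0 (PySem.List.len document - 1) 1).any
            (fun i => pvCond document negationwords i && (PySem.List.pyGetD document (i + 1) "" == w)) then 1 else 0)]) word_features).foldl
        (fun fs p => fs.insert p.1 p.2) (PySem.Dict.empty : PySem.Dict String Int)).getD k 0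
      = if k ∈ PySem.Set.update ([] : List String)
            (List.flatMap (fun a => ["v_" ++ a, "v_NOT" ++ a]) word_features)
        then pvW document word_features negationwords k else 0 := by
    intro k
    rw [pvGetD_foldl_insert_W (pvW document word_features negationwords) _ _ hp
      (by intro k'; simp [PySem.Dict.getD_empty, PySem.Dict.keys_empty]), hkeysB]
  -- assemble via items = map over keys
  rw [PySem.Dict.items_eq_map_keys _ (by rw [hSAk]; rw [← hkeysA]; exact hnodA) 0,
      PySem.Dict.items_eq_map_keys _ hnodB 0, hSAk, hkeysB]
  refine List.map_congr_left ?_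
  intro k hk
  rw [hSAg k, hDBg k, if_pos hk]

-- ===== VERDICT (by name: the statement is the Claim_ definition above) =====
theorem NOT_features_spec : Claim_equal_NOT_features := by
  intro document word_features negationwords _hdom hpre
  exact pv_main document word_features negationwords hpre
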